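-- pv_equiv track=rewrite | github.com/geniusworks/digital-archive-maker | bin/video/rip_video.py | parse_disc_stream_info
-- ===== SOURCE A (Python) =====
-- def parse_disc_stream_info(info_output: str) -> tuple[list, list]:
--     """Parse MakeMKV disc info to extract audio and subtitle stream info"""
--     audio_streams = []
--     subtitle_streams = []
--     streams = {}
--
--     lines = info_output.split("\n")
--
--     for line in lines:
--         if not line.startswith("SINFO:"):
--             continue
--
--         parts = line.split(",", 4)
--         if len(parts) < 5:
--             continue
--
--         try:
--             title_id = parts[0].split(":")[1]
--             stream_id = parts[1]
--             attr_id = parts[2]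
--             value = parts[4].strip('"').strip()
--         except Exception:
--             continue
--
--         key = (title_id, stream_id)
--         if key not in streams:
--             streams[key] = {
--                 "title": title_id,
--                 "track": stream_id,
--                 "type": "unknown",
--                 "language": "und",
--                 "codec": "unknown",
--             }
--
--         if attr_id == "1":
--             streams[key]["type"] = parts[3]
--         elif attr_id == "3":
--             # Language code is usually 3 chars
--             streams[key]["language"] = value[:3] if len(value) >= 3 else value
--         elif attr_id == "5":
--             # Standardize codec names
--             codec = value.lower()
--             if "pgs" in codec:
--                 streams[key]["codec"] = "hdmv_pgs_subtitle"
--             elif "ac3" in codec: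
--                 streams[key]["codec"] = "ac3"
--             elif "dts" in codec:
--                 streams[key]["codec"] = "dts"
--             elif "subrip" in codec or "srt" in codec:
--                 streams[key]["codec"] = "subrip"
--             else:
--                 streams[key]["codec"] = codec
--
--     for key, stream in sorted(streams.items(), key=lambda x: (int(x[0][0]), int(x[0][1]))):
--         if stream["type"] == "6202":
--             audio_streams.append(stream)
--         elif stream["type"] == "6203":
--             subtitle_streams.append(stream)
--
--     return audio_streams, subtitle_streams
-- ===== SOURCE B (Python) =====
-- def parse_disc_stream_info(info_output: str) -> tuple[list, list]:
--     """Parse MakeMKV disc info: group SINFO records per stream, then reduce each group."""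
--     # Pass 1: parse and group records by (title_id, stream_id), first-seen order.
--     records = {}
--     for line in info_output.split("\n"):
--         if not line.startswith("SINFO:"):
--             continue
--         parts = line.split(",", 4)
--         if len(parts) < 5:
--             continue
--         key = (parts[0].split(":")[1], parts[1])
--         rec = (parts[2], parts[3], parts[4].strip('"').strip())
--         records[key] = records.get(key, []) + [rec]
--
--     # Pass 2: fold each group into one stream dict (last write wins).
--     def reduce_group(key, recs):
--         stream = {
--             "title": key[0],
--             "track": key[1],
--             "type": "unknown",
--             "language": "und",
--             "codec": "unknown",
--         }
--         for attr_id, type_field, value in recs: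
--             if attr_id == "1":
--                 stream["type"] = type_field
--             elif attr_id == "3":
--                 stream["language"] = value[:3] if len(value) >= 3 else value
--             elif attr_id == "5":
--                 codec = value.lower()
--                 if "pgs" in codec:
--                     stream["codec"] = "hdmv_pgs_subtitle"
--                 elif "ac3" in codec:
--                     stream["codec"] = "ac3"
--                 elif "dts" in codec:
--                     stream["codec"] = "dts"
--                 elif "subrip" in codec or "srt" in codec:
--                     stream["codec"] = "subrip"
--                 else:
--                     stream["codec"] = codec
--         return stream
--
--     items = [(key, reduce_group(key, recs)) for key, recs in records.items()]
--     items.sort(key=lambda x: (int(x[0][0]), int(x[0][1])))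
--     streams = [stream for _, stream in items]
--     return (
--         [s for s in streams if s["type"] == "6202"],
--         [s for s in streams if s["type"] == "6203"],
--     )
-- ===== Notes on version B (the rewrite author's own statement) =====
-- stated objective: alternative
-- what changed: A mutates one dict of stream dicts in place while scanning; B separates parsing from reduction: a first pass groups the raw (attr, type-field, value) records per (title_id, stream_id) key, a second pass folds each group from the default template via an apply-rule step, then sorts the keyed results and builds the audio/subtitle lists by filtering instead of an appending loop.
import Mathlib
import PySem

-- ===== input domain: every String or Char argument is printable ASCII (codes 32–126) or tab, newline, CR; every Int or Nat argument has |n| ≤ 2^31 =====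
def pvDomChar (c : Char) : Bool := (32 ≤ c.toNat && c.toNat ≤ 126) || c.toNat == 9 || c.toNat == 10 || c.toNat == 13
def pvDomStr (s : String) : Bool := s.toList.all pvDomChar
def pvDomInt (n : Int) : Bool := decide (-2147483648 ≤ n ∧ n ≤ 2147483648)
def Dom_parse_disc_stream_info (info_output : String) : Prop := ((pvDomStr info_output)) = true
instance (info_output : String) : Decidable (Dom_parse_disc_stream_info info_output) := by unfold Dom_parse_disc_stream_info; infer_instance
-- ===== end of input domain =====

-- B replaces A's in-place dict mutation by a group-records-then-reduce decomposition (same cost; no speed claim).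


-- ===== PORT A =====
-- the body of A's 'for line in lines' loop (the stream key is always present when a field
-- is assigned, so the Dict.empty default of 'modify' is never read — it is Python's streams[key][...] = v)
def pvStepA (streams : PySem.Dict (String × String) (PySem.Dict String String)) (line : String) :
    PySem.Dict (String × String) (PySem.Dict String String) :=
  if ¬ (PySem.Str.startswith line "SINFO:" = true) then streams
  else
    let parts := (PySem.Str.splitMax? line "," 4).getD []
    if parts.length < 5 then streams
    else
      let title_id := ((PySem.Str.split? (parts.getD 0 "") ":").getD []).getD 1 ""
      let stream_id := parts.getD 1 ""
      let attr_id := parts.getD 2 ""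
      let value := PySem.Str.strip (PySem.Str.stripChars (parts.getD 4 "") "\"")
      let key := (title_id, stream_id)
      let streams := if streams.contains key then streams else
        streams.insert key (PySem.Dict.ofList
          [("title", title_id), ("track", stream_id), ("type", "unknown"),
           ("language", "und"), ("codec", "unknown")])
      if attr_id == "1" then
        streams.modify key PySem.Dict.empty (fun s => s.insert "type" (parts.getD 3 ""))
      else if attr_id == "3" then
        streams.modify key PySem.Dict.empty (fun s => s.insert "language"
          (if 3 ≤ PySem.Str.len value then PySem.Str.slice value none (some 3) else value))
      else if attr_id == "5" then
        let codec := PySem.Str.lower value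
        streams.modify key PySem.Dict.empty (fun s => s.insert "codec"
          (if PySem.Str.isIn "pgs" codec then "hdmv_pgs_subtitle"
           else if PySem.Str.isIn "ac3" codec then "ac3"
           else if PySem.Str.isIn "dts" codec then "dts"
           else if PySem.Str.isIn "subrip" codec || PySem.Str.isIn "srt" codec then "subrip"
           else codec))
      else streams

def parse_disc_stream_info (info_output : String) :
    (List (List (String × String))) × (List (List (String × String))) :=
  let lines := (PySem.Str.split? info_output "\n").getD []
  let streams := lines.foldl pvStepA PySem.Dict.empty
  let sortedItems := PySem.List.sorted2 streams.items
    (fun x => (PySem.Int.ofStr? x.1.1).getD 0) (fun x => (PySem.Int.ofStr? x.1.2).getD 0)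
  sortedItems.foldl (fun acc kv =>
    if kv.2.getD "type" "" == "6202" then (acc.1 ++ [kv.2.items], acc.2)
    else if kv.2.getD "type" "" == "6203" then (acc.1, acc.2 ++ [kv.2.items])
    else acc) ([], [])

-- ===== PORT B =====
def pvStreamTemplate (key : String × String) : PySem.Dict String String :=
  PySem.Dict.ofList
    [("title", key.1), ("track", key.2), ("type", "unknown"),
     ("language", "und"), ("codec", "unknown")]

-- one record applied to a stream dict (B's reduce_group loop body)
def pvApplyRec (stream : PySem.Dict String String) (r : String × String × String) :
    PySem.Dict String String :=
  if r.1 == "1" then stream.insert "type" r.2.1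
  else if r.1 == "3" then
    stream.insert "language"
      (if 3 ≤ PySem.Str.len r.2.2 then PySem.Str.slice r.2.2 none (some 3) else r.2.2)
  else if r.1 == "5" then
    let codec := PySem.Str.lower r.2.2
    stream.insert "codec"
      (if PySem.Str.isIn "pgs" codec then "hdmv_pgs_subtitle"
       else if PySem.Str.isIn "ac3" codec then "ac3"
       else if PySem.Str.isIn "dts" codec then "dts"
       else if PySem.Str.isIn "subrip" codec || PySem.Str.isIn "srt" codec then "subrip"
       else codec)
  else stream

def pvReduceGroup (key : String × String) (recs : List (String × String × String)) :
    PySem.Dict String String :=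
  recs.foldl pvApplyRec (pvStreamTemplate key)

-- B's pass-1 loop body: parse the line and append its record to its key's group
def pvStepB (records : PySem.Dict (String × String) (List (String × String × String)))
    (line : String) : PySem.Dict (String × String) (List (String × String × String)) :=
  if ¬ (PySem.Str.startswith line "SINFO:" = true) then records
  else
    let parts := (PySem.Str.splitMax? line "," 4).getD []
    if parts.length < 5 then records
    else
      let key := (((PySem.Str.split? (parts.getD 0 "") ":").getD []).getD 1 "", parts.getD 1 "")
      let r := (parts.getD 2 "", parts.getD 3 "",
                PySem.Str.strip (PySem.Str.stripChars (parts.getD 4 "") "\""))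
      records.insert key (records.getD key [] ++ [r])

def parse_disc_stream_info_alt (info_output : String) :
    (List (List (String × String))) × (List (List (String × String))) :=
  let lines := (PySem.Str.split? info_output "\n").getD []
  let records := lines.foldl pvStepB PySem.Dict.empty
  let items := records.items.map (fun kg => (kg.1, pvReduceGroup kg.1 kg.2))
  let items := PySem.List.sorted2 items
    (fun x => (PySem.Int.ofStr? x.1.1).getD 0) (fun x => (PySem.Int.ofStr? x.1.2).getD 0)
  let streams := items.map (fun x => x.2)
  ((streams.filter (fun s => s.getD "type" "" == "6202")).map (fun s => s.items),
   (streams.filter (fun s => s.getD "type" "" == "6203")).map (fun s => s.items))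

-- ===== PRECONDITION & SPEC =====
-- a line is harmless for the final sort if it is filtered out, or both its title and stream
-- ids parse as Python ints
def pvSortKeyOk (line : String) : Bool :=
  !(PySem.Str.startswith line "SINFO:") ||
  (let parts := (PySem.Str.splitMax? line "," 4).getD []
   decide (parts.length < 5) ||
   ((PySem.Int.ofStr? (((PySem.Str.split? (parts.getD 0 "") ":").getD []).getD 1 "")).isSome &&
    (PySem.Int.ofStr? (parts.getD 1 "")).isSome))

-- Pre_ excludes exactly the inputs where A raises ValueError: a kept SINFO line whose
-- title or stream id is not int()-parseable makes A's sort key fail (B raises there too).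
def Pre_parse_disc_stream_info (info_output : String) : Prop :=
  ∀ line ∈ (PySem.Str.split? info_output "\n").getD [], pvSortKeyOk line = true
instance (info_output : String) : Decidable (Pre_parse_disc_stream_info info_output) := by
  unfold Pre_parse_disc_stream_info; infer_instance

def pvWitness_parse_disc_stream_info : String :=
  "SINFO:0,0,1,6202,x\nSINFO:0,0,5,0,\"DTS\"\nTINFO:junk"

def Spec_parse_disc_stream_info (info_output : String)
    (out : (List (List (String × String))) × (List (List (String × String)))) : Prop :=
  out = parse_disc_stream_info_alt info_output
instance (info_output : String) (out : (List (List (String × String))) × (List (List (String × String)))) : Decidable (Spec_parse_disc_stream_info info_output out) := by unfold Spec_parse_disc_stream_info; infer_instance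

-- ===== CLAIM (what is proved, stated in full; the proofs are below) =====
def Claim_equal_parse_disc_stream_info : Prop := ∀ (info_output : String), Dom_parse_disc_stream_info info_output → Pre_parse_disc_stream_info info_output → Spec_parse_disc_stream_info info_output (parse_disc_stream_info info_output)

-- ===== LEMMAS AND PROOFS =====

-- the invariant tying A's stream dict to B's record groups
def pvInv (dA : PySem.Dict (String × String) (PySem.Dict String String))
    (gB : PySem.Dict (String × String) (List (String × String × String))) : Prop :=
  dA.keys.Nodup ∧ dA.keys = gB.keys ∧
  ∀ k, dA.get? k = (gB.get? k).map (fun recs => pvReduceGroup k recs)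

lemma pvInv_empty : pvInv PySem.Dict.empty PySem.Dict.empty := by
  refine ⟨by simp [pysem], by simp [pysem], fun k => by simp [pysem]⟩

lemma pvReduceGroup_append (k : String × String) (recs : List (String × String × String))
    (r : String × String × String) :
    pvReduceGroup k (recs ++ [r]) = pvApplyRec (pvReduceGroup k recs) r := by
  simp [pvReduceGroup]

-- overwriting a key with the value it already holds changes nothing
lemma pvInsert_get?_self {κ ν : Type} [BEq κ] [LawfulBEq κ] (d : PySem.Dict κ ν) (k : κ) (v : ν)
    (hnd : d.keys.Nodup) (hv : d.get? k = some v) : d.insert k v = d := by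
  have hc : d.contains k = true := by rw [PySem.Dict.contains_eq_isSome_get?, hv]; rfl
  apply PySem.Dict.ext
  rw [PySem.Dict.items_insert_of_contains _ _ hc]
  conv_rhs => rw [← List.map_id d.items]
  apply List.map_congr_left
  intro p hp
  by_cases hpk : (p.1 == k) = true
  · have hmem : (p.1, p.2) ∈ d.items := by simpa using hp
    have hgp := PySem.Dict.get?_of_mem_items d hmem hnd
    rw [eq_of_beq hpk, hv] at hgp
    rw [if_pos hpk, Option.some_inj.mp hgp, ← eq_of_beq hpk]
    simp
  · simp [hpk]

-- inserting matched values on both sides preserves the invariant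
lemma pvInv_insert (dA : PySem.Dict (String × String) (PySem.Dict String String))
    (gB : PySem.Dict (String × String) (List (String × String × String)))
    (h : pvInv dA gB) (k : String × String) (recs : List (String × String × String)) :
    pvInv (dA.insert k (pvReduceGroup k recs)) (gB.insert k recs) := by
  obtain ⟨hnd, hk, hget⟩ := h
  have hcc : gB.contains k = dA.contains k := by
    rw [PySem.Dict.contains_eq_decide_mem_keys, PySem.Dict.contains_eq_decide_mem_keys, hk]
  refine ⟨?_, ?_, ?_⟩
  · exact PySem.Dict.nodup_keys_insert _ _ _ hnd
  · cases hc : dA.contains k with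
    | true =>
      rw [PySem.Dict.keys_insert_of_contains _ _ hc,
        PySem.Dict.keys_insert_of_contains _ _ (hcc.trans hc), hk]
    | false =>
      rw [PySem.Dict.keys_insert_of_not_contains _ _ hc,
        PySem.Dict.keys_insert_of_not_contains _ _ (hcc.trans hc), hk]
  · intro k'
    rw [PySem.Dict.get?_insert, PySem.Dict.get?_insert]
    by_cases hk' : k' = k
    · simp [hk']
    · simp only [if_neg hk']; exact hget k'

set_option maxHeartbeats 2000000 in
lemma pvInv_step (dA : PySem.Dict (String × String) (PySem.Dict String String))
    (gB : PySem.Dict (String × String) (List (String × String × String)))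
    (h : pvInv dA gB) (line : String) : pvInv (pvStepA dA line) (pvStepB gB line) := by
  have hInv := h
  obtain ⟨hnd, hk, hget⟩ := h
  unfold pvStepA pvStepB
  by_cases hs : PySem.Str.startswith line "SINFO:" = true
  · rw [if_neg (c := ¬ (PySem.Str.startswith line "SINFO:" = true)) (not_not_intro hs),
      if_neg (c := ¬ (PySem.Str.startswith line "SINFO:" = true)) (not_not_intro hs)]
    dsimp only
    by_cases h5 : ((PySem.Str.splitMax? line "," 4).getD []).length < 5
    · rw [if_pos h5, if_pos h5]; exact hInv
    rw [if_neg h5, if_neg h5]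
    set parts := (PySem.Str.splitMax? line "," 4).getD [] with hparts
    set key : String × String :=
      (((PySem.Str.split? (parts.getD 0 "") ":").getD []).getD 1 "", parts.getD 1 "") with hkey
    set value := PySem.Str.strip (PySem.Str.stripChars (parts.getD 4 "") "\"") with hvalue
    set r : String × String × String := (parts.getD 2 "", parts.getD 3 "", value) with hr
    have hr1 : r.1 = parts.getD 2 "" := rfl
    have hr2 : r.2.1 = parts.getD 3 "" := rfl
    have hr3 : r.2.2 = value := rfl
    have hcc : gB.contains key = dA.contains key := by
      rw [PySem.Dict.contains_eq_decide_mem_keys, PySem.Dict.contains_eq_decide_mem_keys, hk]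
    by_cases hc : dA.contains key = true
    · -- key already present: A updates the stream in place, B appends to the group
      have h1 : (dA.get? key).isSome := by rw [← PySem.Dict.contains_eq_isSome_get?]; exact hc
      cases hg : gB.get? key with
      | none => rw [hget key, hg] at h1; exact absurd h1 (by simp)
      | some recs =>
        have hA : dA.get? key = some (pvReduceGroup key recs) := by rw [hget key, hg]; rfl
        have hgetD : dA.getD key PySem.Dict.empty = pvReduceGroup key recs :=
          PySem.Dict.getD_of_get?_eq_some _ _ hA
        have hgetDB : gB.getD key [] = recs := PySem.Dict.getD_of_get?_eq_some _ _ hg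
        simp only [hc, if_true, hgetDB]
        have hmain : ∀ f : PySem.Dict String String → PySem.Dict String String,
            f (pvReduceGroup key recs) = pvApplyRec (pvReduceGroup key recs) r →
            pvInv (dA.modify key PySem.Dict.empty f) (gB.insert key (recs ++ [r])) := by
          intro f hf
          rw [PySem.Dict.modify, hgetD, hf, ← pvReduceGroup_append]
          exact pvInv_insert _ _ hInv key _
        by_cases ha1 : (parts.getD 2 "" == "1") = true
        · simp only [ha1, if_true]
          exact hmain _ (by simp only [pvApplyRec, hr1, hr2, hr3, ha1, if_true])
        · have ha1' : (parts.getD 2 "" == "1") = false := by simpa using ha1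
          by_cases ha3 : (parts.getD 2 "" == "3") = true
          · simp only [ha1', ha3, Bool.false_eq_true, if_false, if_true]
            exact hmain _ (by simp only [pvApplyRec, hr1, hr2, hr3, ha1', ha3, if_true, Bool.false_eq_true, if_false])
          · have ha3' : (parts.getD 2 "" == "3") = false := by simpa using ha3
            by_cases ha5 : (parts.getD 2 "" == "5") = true
            · simp only [ha1', ha3', ha5, Bool.false_eq_true, if_false, if_true]
              exact hmain _ (by simp only [pvApplyRec, hr1, hr2, hr3, ha1', ha3', ha5, if_true, Bool.false_eq_true, if_false])
            · have ha5' : (parts.getD 2 "" == "5") = false := by simpa using ha5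
              simp only [ha1', ha3', ha5', Bool.false_eq_true, if_false]
              have hid : pvApplyRec (pvReduceGroup key recs) r = pvReduceGroup key recs := by
                simp only [pvApplyRec, hr1, ha1', ha3', ha5', Bool.false_eq_true, if_false]
              have hx := pvInv_insert _ _ hInv key (recs ++ [r])
              rw [pvReduceGroup_append, hid, pvInsert_get?_self _ _ _ hnd hA] at hx
              exact hx
    · -- new key: A starts from the default template, B starts a fresh group
      have hc' : dA.contains key = false := by simpa using hc
      have hcB : gB.contains key = false := hcc.trans hc'
      have hgetDB : gB.getD key [] = [] := PySem.Dict.getD_of_not_contains _ _ hcB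
      have htmpl : PySem.Dict.ofList
          [("title", ((PySem.Str.split? (parts.getD 0 "") ":").getD []).getD 1 ""),
           ("track", parts.getD 1 ""), ("type", "unknown"),
           ("language", "und"), ("codec", "unknown")] = pvStreamTemplate key := by
        rw [hkey]; rfl
      simp only [hc', Bool.false_eq_true, if_false, hgetDB, List.nil_append, htmpl]
      have hmain : ∀ f : PySem.Dict String String → PySem.Dict String String,
          f (pvStreamTemplate key) = pvApplyRec (pvStreamTemplate key) r →
          pvInv ((dA.insert key (pvStreamTemplate key)).modify key PySem.Dict.empty f)
            (gB.insert key [r]) := by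
        intro f hf
        rw [PySem.Dict.modify, PySem.Dict.getD_insert_self, hf, PySem.Dict.insert_insert_self]
        exact pvInv_insert _ _ hInv key [r]
      by_cases ha1 : (parts.getD 2 "" == "1") = true
      · simp only [ha1, if_true]
        exact hmain _ (by simp only [pvApplyRec, hr1, hr2, hr3, ha1, if_true])
      · have ha1' : (parts.getD 2 "" == "1") = false := by simpa using ha1
        by_cases ha3 : (parts.getD 2 "" == "3") = true
        · simp only [ha1', ha3, Bool.false_eq_true, if_false, if_true]
          exact hmain _ (by simp only [pvApplyRec, hr1, hr2, hr3, ha1', ha3, if_true, Bool.false_eq_true, if_false])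
        · have ha3' : (parts.getD 2 "" == "3") = false := by simpa using ha3
          by_cases ha5 : (parts.getD 2 "" == "5") = true
          · simp only [ha1', ha3', ha5, Bool.false_eq_true, if_false, if_true]
            exact hmain _ (by simp only [pvApplyRec, hr1, hr2, hr3, ha1', ha3', ha5, if_true, Bool.false_eq_true, if_false])
          · have ha5' : (parts.getD 2 "" == "5") = false := by simpa using ha5
            simp only [ha1', ha3', ha5', Bool.false_eq_true, if_false]
            have hid : pvApplyRec (pvStreamTemplate key) r = pvStreamTemplate key := by
              simp only [pvApplyRec, hr1, ha1', ha3', ha5', Bool.false_eq_true, if_false]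
            have hx := pvInv_insert _ _ hInv key [r]
            have h1r : pvReduceGroup key [r] = pvApplyRec (pvStreamTemplate key) r := rfl
            rw [h1r, hid] at hx
            exact hx
  · rw [if_pos hs, if_pos hs]; exact hInv

lemma pvInv_foldl (lines : List String)
    (dA : PySem.Dict (String × String) (PySem.Dict String String))
    (gB : PySem.Dict (String × String) (List (String × String × String)))
    (h : pvInv dA gB) : pvInv (lines.foldl pvStepA dA) (lines.foldl pvStepB gB) := by
  induction lines generalizing dA gB with
  | nil => exact h
  | cons l ls ih => exact ih _ _ (pvInv_step _ _ h l)

lemma pvItems_of_inv (dA : PySem.Dict (String × String) (PySem.Dict String String))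
    (gB : PySem.Dict (String × String) (List (String × String × String)))
    (h : pvInv dA gB) :
    dA.items = gB.items.map (fun kg => (kg.1, pvReduceGroup kg.1 kg.2)) := by
  obtain ⟨hnd, hk, hget⟩ := h
  have hndB : gB.keys.Nodup := hk ▸ hnd
  rw [PySem.Dict.items_eq_map_keys dA hnd PySem.Dict.empty,
      PySem.Dict.items_eq_map_keys gB hndB [], List.map_map, hk]
  apply List.map_congr_left
  intro k hkmem
  have h1 : dA.get? k ≠ none := by
    rw [Ne, PySem.Dict.get?_eq_none_iff_not_mem_keys, not_not]
    exact hk ▸ hkmem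
  obtain ⟨v, hv⟩ := Option.ne_none_iff_exists'.mp h1
  have h2 := hget k
  rw [hv] at h2
  cases hg : gB.get? k with
  | none => rw [hg] at h2; simp at h2
  | some recs =>
    rw [hg] at h2
    simp only [Option.map_some, Option.some_inj] at h2
    simp [Function.comp, PySem.Dict.getD_of_get?_eq_some _ _ hv,
      PySem.Dict.getD_of_get?_eq_some _ _ hg, h2]

lemma pvPartition_foldl
    (L : List ((String × String) × PySem.Dict String String))
    (a s : List (List (String × String))) :
    L.foldl (fun acc kv =>
      if kv.2.getD "type" "" == "6202" then (acc.1 ++ [kv.2.items], acc.2)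
      else if kv.2.getD "type" "" == "6203" then (acc.1, acc.2 ++ [kv.2.items])
      else acc) (a, s)
    = (a ++ ((L.map (fun x => x.2)).filter (fun t => t.getD "type" "" == "6202")).map (fun t => t.items),
       s ++ ((L.map (fun x => x.2)).filter (fun t => t.getD "type" "" == "6203")).map (fun t => t.items)) := by
  induction L generalizing a s with
  | nil => simp
  | cons kv L ih =>
    by_cases h1 : (kv.2.getD "type" "" == "6202") = true
    · have h2 : (kv.2.getD "type" "" == "6203") = false := by
        rw [beq_iff_eq.mp h1]; decide
      simp only [List.foldl_cons, h1, h2, if_true, Bool.false_eq_true, if_false]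
      rw [ih]
      simp [h1, h2]
    · rw [Bool.not_eq_true] at h1
      by_cases h2 : (kv.2.getD "type" "" == "6203") = true
      · simp only [List.foldl_cons, h1, h2, if_true, Bool.false_eq_true, if_false]
        rw [ih]
        simp [h1, h2]
      · rw [Bool.not_eq_true] at h2
        simp only [List.foldl_cons, h1, h2, Bool.false_eq_true, if_false]
        rw [ih]
        simp [h1, h2]

-- ===== VERDICT (by name: the statement is the Claim_ definition above) =====
theorem parse_disc_stream_info_spec : Claim_equal_parse_disc_stream_info := by
  intro info _hdom _hpre
  unfold Spec_parse_disc_stream_info parse_disc_stream_info parse_disc_stream_info_alt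
  dsimp only
  have hinv := pvInv_foldl ((PySem.Str.split? info "\n").getD []) _ _ pvInv_empty
  rw [pvItems_of_inv _ _ hinv, pvPartition_foldl]
  simp
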